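-- pv_equiv track=rewrite | github.com/fatjan/practice-code | bootcamp/bell-toll.py | bell_tolls
-- ===== SOURCE A (Python) =====
-- def bell_tolls(n, creatures):
--     bell_count = 0
--
--     for i in range(n - 1, 0, -1):
--         if creatures[i] == 'O':
--             bell_count += 1
--             # Turn the current ocelot into a zebra
--             creatures[i] = 'Z'
--             # Turn all zebras below it into ocelots
--             for j in range(i - 1, -1, -1):
--                 if creatures[j] == 'Z':
--                     creatures[j] = 'O'
--                 else:
--                     break  # Stop when a non-zebra is encountered
--
--     return bell_count
-- ===== SOURCE B (Python) =====
-- def bell_tolls(n, creatures):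
--     bell_count = 0
--     i = n - 1
--     while i >= 1:
--         if creatures[i] == 'O':
--             # find the start of the contiguous zebra run just below i
--             j = i - 1
--             while j >= 0 and creatures[j] == 'Z':
--                 j -= 1
--             start = j + 1
--             low = max(start, 1)
--             # the whole cascade i, i-1, ..., low tolls one bell each
--             bell_count += i - low + 1
--             i = low - 1
--         else:
--             i -= 1
--     return bell_count
-- ===== Notes on version B (the rewrite author's own statement) =====
-- stated objective: alternative
-- what changed: Replaces A's mutating binary-counter simulation (set current 'O' to 'Z', flip the zebra run below back to 'O', then re-visit each of those positions one by one) with a non-mutating skip-scan: at each 'O' it locates the start of the contiguous 'Z' run below, adds the whole cascade's length in one arithmetic step and jumps past the run.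
import Mathlib
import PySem

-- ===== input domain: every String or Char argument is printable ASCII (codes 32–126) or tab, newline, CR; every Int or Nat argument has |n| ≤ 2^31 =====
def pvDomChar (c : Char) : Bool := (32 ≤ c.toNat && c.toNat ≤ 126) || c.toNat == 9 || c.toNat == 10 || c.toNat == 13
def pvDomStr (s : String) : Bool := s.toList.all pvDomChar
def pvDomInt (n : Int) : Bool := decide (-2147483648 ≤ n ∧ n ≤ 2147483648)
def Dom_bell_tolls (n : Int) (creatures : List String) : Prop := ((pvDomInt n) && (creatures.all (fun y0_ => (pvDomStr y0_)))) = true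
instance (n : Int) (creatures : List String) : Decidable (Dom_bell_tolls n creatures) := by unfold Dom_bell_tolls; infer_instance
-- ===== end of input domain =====

-- B replaces A's mutating flip simulation by a non-mutating skip-scan over zebra runs;
-- equivalence is about the RETURN value only: A mutates `creatures` in place, B does not.

-- ===== PORT A =====
-- inner loop: for j in range(i-1,-1,-1): flip 'Z'→'O', break on non-'Z'
def aFlip (creatures : List String) (js : List Int) : List String :=
  match js with
  | [] => creatures
  | j :: rest =>
      if PySem.List.pyGetD creatures j "" == "Z" then
        aFlip (PySem.List.pySetD creatures j "O") rest
      else creatures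

-- body of the outer for-loop, state = (bell_count, creatures)
def aStep (st : Int × List String) (i : Int) : Int × List String :=
  if PySem.List.pyGetD st.2 i "" == "O" then
    (st.1 + 1, aFlip (PySem.List.pySetD st.2 i "Z") (PySem.List.pyRange (i - 1) (-1) (-1)))
  else st

def bell_tolls (n : Int) (creatures : List String) : Int :=
  ((PySem.List.pyRange (n - 1) 0 (-1)).foldl aStep ((0 : Int), creatures)).1

-- ===== PORT B =====
-- B's while loops, ported as structural recursion on a fuel bound (the loop variable strictly
-- decreases, so the fuel is never exhausted; it only makes the recursion structural).

-- inner while: j -= 1 while j >= 0 and creatures[j] == 'Z'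
def altRunStart (creatures : List String) (fuel : Nat) (j : Int) : Int :=
  match fuel with
  | 0 => j
  | fuel + 1 =>
      if 0 ≤ j ∧ PySem.List.pyGetD creatures j "" == "Z" then
        altRunStart creatures fuel (j - 1)
      else j

-- outer while loop of B
def altGo (creatures : List String) (fuel : Nat) (i : Int) (count : Int) : Int :=
  match fuel with
  | 0 => count
  | fuel + 1 =>
      if 1 ≤ i then
        if PySem.List.pyGetD creatures i "" == "O" then
          let start := altRunStart creatures i.toNat (i - 1) + 1
          let low := max start 1
          altGo creatures fuel (low - 1) (count + (i - low + 1))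
        else altGo creatures fuel (i - 1) count
      else count

def bell_tolls_alt (n : Int) (creatures : List String) : Int :=
  altGo creatures (n - 1).toNat (n - 1) 0

-- ===== PRECONDITION & SPEC =====
-- Pre_ excludes exactly the IndexError inputs: A reads creatures[n-1] whenever n ≥ 2
def Pre_bell_tolls (n : Int) (creatures : List String) : Prop :=
  n ≤ 1 ∨ n ≤ (creatures.length : Int)
instance (n : Int) (creatures : List String) : Decidable (Pre_bell_tolls n creatures) := by
  unfold Pre_bell_tolls; infer_instance

def pvWitness_bell_tolls : Int × List String := (3, ["Z", "O", "O"])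

def Spec_bell_tolls (n : Int) (creatures : List String) (out : Int) : Prop := out = bell_tolls_alt n creatures
instance (n : Int) (creatures : List String) (out : Int) : Decidable (Spec_bell_tolls n creatures out) := by unfold Spec_bell_tolls; infer_instance

-- ===== CLAIM (what is proved, stated in full; the proofs are below) =====
def Claim_equal_bell_tolls : Prop := ∀ (n : Int) (creatures : List String), Dom_bell_tolls n creatures → Pre_bell_tolls n creatures → Spec_bell_tolls n creatures (bell_tolls n creatures)

-- ===== LEMMAS AND PROOFS =====

-- entry m of arr, as A and B read it (Python list indexing with a nonnegative in-range index)
def gEnt (arr : List String) (m : Nat) : String := arr.getD m ""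

-- count of A's outer loop run from index i down to 1 on array arr, starting from count 0
def countA (arr : List String) (i : Nat) : Int :=
  ((PySem.List.pyRange (i : Int) 0 (-1)).foldl aStep ((0 : Int), arr)).1

theorem countA_zero (arr : List String) : countA arr 0 = 0 := by
  simp [countA, PySem.List.pyRange_neg_one_eq_nil]

theorem aStep_affine (c : Int) (arr : List String) (i : Int) :
    aStep (c, arr) i = (c + (aStep (0, arr) i).1, (aStep (0, arr) i).2) := by
  simp only [aStep]
  split <;> simp

theorem foldA_affine (is : List Int) (c : Int) (arr : List String) :
    is.foldl aStep (c, arr)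
      = (c + (is.foldl aStep (0, arr)).1, (is.foldl aStep (0, arr)).2) := by
  induction is generalizing c arr with
  | nil => simp
  | cons j rest ih =>
      simp only [List.foldl_cons]
      rw [aStep_affine c arr j]
      rcases h : aStep (0, arr) j with ⟨c1, arr1⟩
      rw [ih, ih c1 arr1]
      ring_nf

theorem countA_succ (arr : List String) (i : Nat) :
    countA arr (i + 1)
      = if gEnt arr (i + 1) = "O" then
          1 + countA (aFlip (arr.set (i + 1) "Z") (PySem.List.pyRange (i : Int) (-1) (-1))) i
        else countA arr i := by
  unfold countA
  rw [PySem.List.pyRange_neg_one_cons (by exact_mod_cast Nat.succ_pos i)]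
  rw [List.foldl_cons]
  have hcast : ((i + 1 : Nat) : Int) - 1 = (i : Int) := by push_cast; ring
  simp only [aStep, PySem.List.pyGetD_natCast, PySem.List.pySetD_natCast, hcast, gEnt, beq_iff_eq]
  split
  · rw [foldA_affine]; norm_num
  · rfl

-- aFlip breaks immediately on a non-'Z' head
theorem aFlip_cons_ne (arr : List String) (j : Int) (rest : List Int)
    (h : ¬ PySem.List.pyGetD arr j "" = "Z") :
    aFlip arr (j :: rest) = arr := by
  simp [aFlip, h]

-- reading through List.set
theorem gEnt_set_ne (arr : List String) (a b : Nat) (v : String) (h : a ≠ b) :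
    gEnt (arr.set a v) b = gEnt arr b := by
  simp [gEnt, List.getD, List.getElem?_set_ne h]

theorem gEnt_set_self (arr : List String) (a : Nat) (v : String) (h : a < arr.length) :
    gEnt (arr.set a v) a = v := by
  simp [gEnt, List.getD, h]

-- aFlip on the contiguous zebra run k..j: pointwise result
theorem aFlip_run (j k : Nat) (arr : List String)
    (hkj : k ≤ j) (hj : j < arr.length)
    (hrun : ∀ m : Nat, k ≤ m → m ≤ j → gEnt arr m = "Z")
    (hstop : k = 0 ∨ gEnt arr (k - 1) ≠ "Z") :
    (aFlip arr (PySem.List.pyRange (j : Int) (-1) (-1))).length = arr.length ∧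
    ∀ m : Nat, gEnt (aFlip arr (PySem.List.pyRange (j : Int) (-1) (-1))) m
      = if k ≤ m ∧ m ≤ j then "O" else gEnt arr m := by
  induction j using Nat.strong_induction_on generalizing arr with
  | _ j ih =>
  rw [PySem.List.pyRange_neg_one_cons (by omega)]
  have hz : (PySem.List.pyGetD arr (j : Int) "" == "Z") = true := by
    simp only [PySem.List.pyGetD_natCast, beq_iff_eq]
    exact hrun j hkj le_rfl
  simp only [aFlip, hz, if_true, PySem.List.pySetD_natCast]
  rcases Nat.eq_or_lt_of_le hkj with hEq | hLt
  · -- j = k: one flip, then break (or empty range)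
    subst hEq
    by_cases hk0 : k = 0
    · subst hk0
      rw [PySem.List.pyRange_neg_one_eq_nil (by norm_num)]
      simp only [aFlip]
      refine ⟨by simp, fun m => ?_⟩
      by_cases hm : m = 0
      · subst hm; rw [gEnt_set_self arr 0 "O" hj]; simp
      · rw [gEnt_set_ne arr 0 m "O" (by omega)]
        simp [hm]
    · have hcast : (k : Int) - 1 = ((k - 1 : Nat) : Int) := by omega
      rw [hcast, PySem.List.pyRange_neg_one_cons (by omega)]
      rw [aFlip_cons_ne _ _ _ (by
        simp only [PySem.List.pyGetD_natCast]
        have h2 : gEnt (arr.set k "O") (k - 1) = gEnt arr (k - 1) := gEnt_set_ne arr k (k - 1) "O" (by omega)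
        simp only [gEnt] at h2
        rw [h2]
        rcases hstop with h | h
        · omega
        · simpa [gEnt] using h)]
      refine ⟨by simp, fun m => ?_⟩
      by_cases hm : m = k
      · subst hm; rw [gEnt_set_self arr m "O" hj]; simp
      · rw [gEnt_set_ne arr k m "O" (by omega)]
        have : ¬ (k ≤ m ∧ m ≤ k) := by omega
        simp [this]
  · -- k < j: flip j, recurse on j-1
    have hcast : (j : Int) - 1 = ((j - 1 : Nat) : Int) := by omega
    rw [hcast]
    have hrec := ih (j - 1) (by omega) (arr.set j "O") (by omega) (by simp; omega)
      (fun m hkm hmj => by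
        rw [gEnt_set_ne arr j m "O" (by omega)]
        exact hrun m hkm (by omega))
      (by
        rcases hstop with h | h
        · exact Or.inl h
        · exact Or.inr (by rw [gEnt_set_ne arr j (k - 1) "O" (by omega)]; exact h))
    refine ⟨by simpa using hrec.1, fun m => ?_⟩
    rw [hrec.2 m]
    by_cases hm1 : k ≤ m ∧ m ≤ j - 1
    · simp [hm1]; omega
    · by_cases hm2 : m = j
      · subst hm2
        have : ¬ (k ≤ m ∧ m ≤ m - 1) := by omega
        simp only [if_neg this]
        rw [gEnt_set_self arr m "O" hj]
        simp [hkj]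
      · rw [if_neg hm1, gEnt_set_ne arr j m "O" (by omega)]
        have : ¬ (k ≤ m ∧ m ≤ j) := by omega
        rw [if_neg this]

-- aFlip computes in lockstep on arrays that agree up to index b (all of js lying in [0, b])
theorem aFlip_congr (js : List Int) (b : Nat) (arr arr' : List String)
    (hjs : ∀ j ∈ js, 0 ≤ j ∧ j ≤ (b : Int))
    (hlen : arr.length = arr'.length)
    (hag : ∀ m : Nat, m ≤ b → gEnt arr m = gEnt arr' m) :
    (aFlip arr js).length = arr.length ∧ (aFlip arr' js).length = arr'.length ∧
    ∀ m : Nat, m ≤ b → gEnt (aFlip arr js) m = gEnt (aFlip arr' js) m := by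
  induction js generalizing arr arr' with
  | nil => exact ⟨rfl, rfl, fun m hm => hag m hm⟩
  | cons j rest ih =>
      obtain ⟨hj0, hjb⟩ := hjs j (List.mem_cons_self)
      have hcast : j = ((j.toNat : Nat) : Int) := by omega
      have hread : PySem.List.pyGetD arr j "" = PySem.List.pyGetD arr' j "" := by
        rw [hcast, PySem.List.pyGetD_natCast, PySem.List.pyGetD_natCast]
        exact hag j.toNat (by omega)
      simp only [aFlip, hread]
      split
      · rw [hcast, PySem.List.pySetD_natCast, PySem.List.pySetD_natCast]
        have := ih (arr.set j.toNat "O") (arr'.set j.toNat "O")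
          (fun x hx => hjs x (List.mem_cons_of_mem j hx))
          (by simp [hlen])
          (fun m hm => by
            by_cases hmj : m = j.toNat
            · rw [hmj]
              by_cases hml : j.toNat < arr.length
              · rw [gEnt_set_self arr j.toNat "O" hml, gEnt_set_self arr' j.toNat "O" (by omega)]
              · rw [List.set_eq_of_length_le (by omega), List.set_eq_of_length_le (by omega)]
                exact hag j.toNat (by omega)
            · rw [gEnt_set_ne arr j.toNat m "O" (fun h => hmj h.symm),
                  gEnt_set_ne arr' j.toNat m "O" (fun h => hmj h.symm)]
              exact hag m hm)
        refine ⟨by simpa using this.1, by simpa using this.2.1, this.2.2⟩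
      · exact ⟨rfl, rfl, fun m hm => hag m hm⟩

-- two arrays of equal length agreeing up to index i produce the same count
theorem countA_congr (i : Nat) (arr arr' : List String)
    (hlen : arr.length = arr'.length)
    (hag : ∀ m : Nat, m ≤ i → gEnt arr m = gEnt arr' m) :
    countA arr i = countA arr' i := by
  induction i generalizing arr arr' with
  | zero => rw [countA_zero, countA_zero]
  | succ i ih =>
      rw [countA_succ, countA_succ, hag (i + 1) le_rfl]
      split
      · have hflip := aFlip_congr (PySem.List.pyRange (i : Int) (-1) (-1)) (i + 1)
          (arr.set (i + 1) "Z") (arr'.set (i + 1) "Z")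
          (fun j hj => by
            rw [PySem.List.mem_pyRange_neg_one] at hj
            omega)
          (by simp [hlen])
          (fun m hm => by
            by_cases hmj : m = i + 1
            · rw [hmj]
              by_cases hml : i + 1 < arr.length
              · rw [gEnt_set_self arr (i + 1) "Z" hml, gEnt_set_self arr' (i + 1) "Z" (by omega)]
              · rw [List.set_eq_of_length_le (by omega), List.set_eq_of_length_le (by omega)]
                exact hag (i + 1) (by omega)
            · rw [gEnt_set_ne arr (i + 1) m "Z" (fun h => hmj h.symm),
                  gEnt_set_ne arr' (i + 1) m "Z" (fun h => hmj h.symm)]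
              exact hag m hm)
        have := ih _ _ (by rw [hflip.1, hflip.2.1]; simp [hlen])
          (fun m hm => hflip.2.2 m (by omega))
        rw [this]
      · exact ih arr arr' hlen (fun m hm => hag m (by omega))

-- cascade over a suffix of 'O's from i down to max k 1
theorem countA_osuffix (i : Nat) (k : Nat) (arr : List String)
    (hki : k ≤ i) (hi : i < arr.length)
    (hrun : ∀ m : Nat, k ≤ m → m ≤ i → gEnt arr m = "O")
    (hstop : k = 0 ∨ gEnt arr (k - 1) ≠ "Z") :
    countA arr i = ((i : Int) - ((max k 1 : Nat) : Int) + 1) + countA arr (max k 1 - 1) := by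
  induction i using Nat.strong_induction_on generalizing arr with
  | _ i ih =>
  rcases Nat.eq_zero_or_pos i with rfl | hpos
  · have hk0 : k = 0 := by omega
    subst hk0
    rw [countA_zero]
    norm_num [countA_zero]
  · obtain ⟨i', rfl⟩ : ∃ i', i = i' + 1 := ⟨i - 1, by omega⟩
    rw [countA_succ, if_pos (hrun (i' + 1) (by omega) le_rfl)]
    -- the inner flip loop breaks immediately: the entry below is 'O' or the stop entry
    have hbreak : aFlip ((arr.set (i' + 1) "Z")) (PySem.List.pyRange (i' : Int) (-1) (-1))
        = arr.set (i' + 1) "Z" := by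
      rw [PySem.List.pyRange_neg_one_cons (by omega)]
      apply aFlip_cons_ne
      simp only [PySem.List.pyGetD_natCast]
      have hne : gEnt (arr.set (i' + 1) "Z") i' = gEnt arr i' :=
        gEnt_set_ne arr (i' + 1) i' "Z" (by omega)
      simp only [gEnt] at hne
      rw [hne]
      by_cases hik : k ≤ i'
      · have hOi := hrun i' hik (by omega)
        simp only [gEnt, List.getD] at hOi
        simp [hOi]
      · have hk1 : 1 ≤ k := by omega
        rcases hstop with h | h
        · omega
        · have hkk : k - 1 = i' := by omega
          rw [hkk] at h
          simpa [gEnt] using h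
    rw [hbreak]
    have hsetlen : (arr.set (i' + 1) "Z").length = arr.length := by simp
    have hagree : ∀ m : Nat, m ≤ i' → gEnt (arr.set (i' + 1) "Z") m = gEnt arr m :=
      fun m hm => gEnt_set_ne arr (i' + 1) m "Z" (by omega)
    by_cases htop : i' + 1 = max k 1
    · -- bottom of the cascade
      have h1 : countA (arr.set (i' + 1) "Z") i' = countA arr i' := by
        exact countA_congr i' _ _ hsetlen hagree
      rw [h1]
      have h2 : max k 1 - 1 = i' := by omega
      rw [h2]
      have : ((i' + 1 : Nat) : Int) = ((max k 1 : Nat) : Int) := by exact_mod_cast htop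
      rw [this]
      ring
    · -- recurse at i'
      have hrec := ih i' (by omega) (arr.set (i' + 1) "Z") (by omega) (by omega)
        (fun m hkm hmi => by
          rw [gEnt_set_ne arr (i' + 1) m "Z" (by omega)]
          exact hrun m hkm (by omega))
        (by
          rcases hstop with h | h
          · exact Or.inl h
          · exact Or.inr (by rw [gEnt_set_ne arr (i' + 1) (k - 1) "Z" (by omega)]; exact h))
      rw [hrec]
      have h1 : countA (arr.set (i' + 1) "Z") (max k 1 - 1) = countA arr (max k 1 - 1) :=
        countA_congr _ _ _ hsetlen (fun m hm => hagree m (by omega))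
      rw [h1]
      push_cast
      ring

-- full cascade: an 'O' at i with the zebra run k..i-1 below it
theorem countA_cascade (i k : Nat) (arr : List String)
    (hi1 : 1 ≤ i) (hi : i < arr.length) (hki : k ≤ i)
    (hO : gEnt arr i = "O")
    (hrun : ∀ m : Nat, k ≤ m → m ≤ i - 1 → gEnt arr m = "Z")
    (hstop : k = 0 ∨ gEnt arr (k - 1) ≠ "Z") :
    countA arr i = ((i : Int) - ((max k 1 : Nat) : Int) + 1) + countA arr (max k 1 - 1) := by
  obtain ⟨i', rfl⟩ : ∃ i', i = i' + 1 := ⟨i - 1, by omega⟩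
  rw [countA_succ, if_pos hO]
  have hsetlen : (arr.set (i' + 1) "Z").length = arr.length := by simp
  have hagree : ∀ m : Nat, m ≤ i' → gEnt (arr.set (i' + 1) "Z") m = gEnt arr m :=
    fun m hm => gEnt_set_ne arr (i' + 1) m "Z" (by omega)
  by_cases hk : k = i' + 1
  · -- empty zebra run: the inner loop breaks at once
    have hbreak : aFlip ((arr.set (i' + 1) "Z")) (PySem.List.pyRange (i' : Int) (-1) (-1))
        = arr.set (i' + 1) "Z" := by
      rw [PySem.List.pyRange_neg_one_cons (by omega)]
      apply aFlip_cons_ne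
      simp only [PySem.List.pyGetD_natCast]
      have hne := hagree i' le_rfl
      simp only [gEnt] at hne
      rw [hne]
      rcases hstop with h | h
      · omega
      · have hkk : k - 1 = i' := by omega
        rw [hkk] at h
        simpa [gEnt, List.getD] using h
    rw [hbreak]
    rw [countA_congr i' _ _ hsetlen hagree]
    have h2 : max k 1 - 1 = i' := by omega
    have h3 : ((max k 1 : Nat) : Int) = ((i' + 1 : Nat) : Int) := by
      have : max k 1 = i' + 1 := by omega
      exact_mod_cast this
    rw [h2, h3]
    push_cast
    ring
  · -- non-empty zebra run k..i'
    have hki' : k ≤ i' := by omega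
    have hflip := aFlip_run i' k (arr.set (i' + 1) "Z") hki' (by omega)
      (fun m hkm hmi => by
        rw [hagree m hmi]
        exact hrun m hkm (by omega))
      (by
        rcases hstop with h | h
        · exact Or.inl h
        · exact Or.inr (by rw [gEnt_set_ne arr (i' + 1) (k - 1) "Z" (by omega)]; exact h))
    set arr2 := aFlip (arr.set (i' + 1) "Z") (PySem.List.pyRange (i' : Int) (-1) (-1)) with harr2
    have hlen2 : arr2.length = arr.length := by rw [hflip.1]; simp
    have hsuffix := countA_osuffix i' k arr2 hki' (by rw [hlen2]; omega)
      (fun m hkm hmi => by rw [hflip.2 m]; simp [hkm, hmi])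
      (by
        by_cases hk0 : k = 0
        · exact Or.inl hk0
        · refine Or.inr ?_
          rw [hflip.2 (k - 1), if_neg (by omega)]
          rw [gEnt_set_ne arr (i' + 1) (k - 1) "Z" (by omega)]
          rcases hstop with h | h
          · omega
          · exact h)
    rw [hsuffix]
    have hrepl : countA arr2 (max k 1 - 1) = countA arr (max k 1 - 1) := by
      rcases Nat.eq_zero_or_pos k with hk0 | hk1
      · subst hk0
        rw [show max 0 1 - 1 = 0 from rfl, countA_zero, countA_zero]
      · apply countA_congr _ _ _ hlen2
        intro m hm
        rw [hflip.2 m, if_neg (by omega)]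
        exact hagree m (by omega)
    rw [hrepl]
    push_cast
    ring

theorem altRunStart_le (creatures : List String) (fuel : Nat) (j : Int) :
    altRunStart creatures fuel j ≤ j := by
  induction fuel generalizing j with
  | zero => simp [altRunStart]
  | succ fuel ih =>
      rw [altRunStart]
      split
      · have := ih (j - 1); omega
      · omega

theorem altRunStart_spec (creatures : List String) (fuel : Nat) (j : Int)
    (hf : (j + 1).toNat ≤ fuel) :
    (-1 ≤ j → -1 ≤ altRunStart creatures fuel j) ∧
    (∀ m : Int, altRunStart creatures fuel j < m → m ≤ j → PySem.List.pyGetD creatures m "" = "Z") ∧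
    (altRunStart creatures fuel j < 0 ∨ ¬ PySem.List.pyGetD creatures (altRunStart creatures fuel j) "" = "Z") := by
  induction fuel generalizing j with
  | zero =>
      have hj : j < 0 := by omega
      simp only [altRunStart]
      exact ⟨fun h => by omega, fun m h1 h2 => by omega, Or.inl (by omega)⟩
  | succ fuel ih =>
      rw [altRunStart]
      split
      · rename_i h
        obtain ⟨h0, hz⟩ := h
        have ihs := ih (j - 1) (by omega)
        refine ⟨fun _ => ihs.1 (by omega), fun m h1 h2 => ?_, ihs.2.2⟩
        by_cases hmj : m = j
        · subst hmj; exact beq_iff_eq.mp hz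
        · exact ihs.2.1 m h1 (by omega)
      · rename_i h
        refine ⟨fun hj => hj, fun m h1 h2 => by omega, ?_⟩
        by_cases h0 : 0 ≤ j
        · refine Or.inr fun hc => h ⟨h0, beq_iff_eq.mpr hc⟩
        · exact Or.inl (by omega)

theorem altGo_affine (creatures : List String) (fuel : Nat) (i : Int) (c : Int) :
    altGo creatures fuel i c = c + altGo creatures fuel i 0 := by
  induction fuel generalizing i c with
  | zero => simp [altGo]
  | succ fuel ih =>
      rw [altGo]
      conv_rhs => rw [altGo]
      split
      · split
        · simp only []
          rw [ih _ (c + _), ih _ (0 + _)]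
          ring
        · rw [ih _ c, ih _ (0 : Int)]
      · ring

theorem main_lemma (i : Nat) (arr : List String) (fuel : Nat) (hf : i ≤ fuel)
    (h : i < arr.length ∨ i = 0) :
    countA arr i = altGo arr fuel (i : Int) 0 := by
  induction i using Nat.strong_induction_on generalizing arr fuel with
  | _ i ih =>
  rcases Nat.eq_zero_or_pos i with rfl | hpos
  · rw [countA_zero]
    cases fuel <;> simp [altGo]
  · have hlen : i < arr.length := by omega
    obtain ⟨i', rfl⟩ : ∃ i', i = i' + 1 := ⟨i - 1, by omega⟩
    obtain ⟨f, rfl⟩ : ∃ f, fuel = f + 1 := ⟨fuel - 1, by omega⟩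
    rw [altGo]
    rw [if_pos (by omega : (1 : Int) ≤ ((i' + 1 : Nat) : Int))]
    have hcast : ((i' + 1 : Nat) : Int) - 1 = ((i' : Nat) : Int) := by push_cast; ring
    have hfuelcast : ((i' + 1 : Nat) : Int).toNat = i' + 1 := by omega
    by_cases hO : gEnt arr (i' + 1) = "O"
    · rw [if_pos (show (PySem.List.pyGetD arr ((i' + 1 : Nat) : Int) "" == "O") = true by
        rw [PySem.List.pyGetD_natCast, beq_iff_eq]; exact hO)]
      simp only [hcast, hfuelcast]
      have hspec := altRunStart_spec arr (i' + 1) (i' : Int) (by omega)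
      have hrle : altRunStart arr (i' + 1) (i' : Int) ≤ (i' : Int) :=
        altRunStart_le arr (i' + 1) (i' : Int)
      set r := altRunStart arr (i' + 1) (i' : Int) with hr
      have hrge : -1 ≤ r := hspec.1 (by omega)
      set k : Nat := (r + 1).toNat with hk
      have hrk : r = (k : Int) - 1 := by omega
      have hki : k ≤ i' + 1 := by omega
      have hA := countA_cascade (i' + 1) k arr (by omega) hlen hki hO
        (fun m hkm hmi => by
          have hmz := hspec.2.1 (m : Int) (by omega) (by omega)
          rw [PySem.List.pyGetD_natCast] at hmz
          simpa [gEnt] using hmz)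
        (by
          by_cases hk0 : k = 0
          · exact Or.inl hk0
          · rcases hspec.2.2 with hneg | hne
            · exact absurd hneg (by omega)
            · refine Or.inr ?_
              have hrcast : r = ((k - 1 : Nat) : Int) := by omega
              rw [hrcast, PySem.List.pyGetD_natCast] at hne
              simpa [gEnt] using hne)
      rw [hA, altGo_affine]
      have hmaxcast : max (r + 1) 1 = ((max k 1 : Nat) : Int) := by omega
      have hlowcast : ((max k 1 : Nat) : Int) - 1 = ((max k 1 - 1 : Nat) : Int) := by omega
      rw [hmaxcast, hlowcast]
      rw [← ih (max k 1 - 1) (by omega) arr f (by omega) (by omega)]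
      ring
    · rw [if_neg (show ¬ (PySem.List.pyGetD arr ((i' + 1 : Nat) : Int) "" == "O") = true by
        rw [PySem.List.pyGetD_natCast, beq_iff_eq]; exact hO)]
      rw [countA_succ, if_neg hO, hcast]
      exact ih i' (by omega) arr f (by omega) (by omega)

-- ===== VERDICT (by name: the statement is the Claim_ definition above) =====
theorem bell_tolls_spec : Claim_equal_bell_tolls := by
  intro n creatures _ hpre
  unfold Spec_bell_tolls bell_tolls bell_tolls_alt
  rcases (by omega : n ≤ 1 ∨ 1 < n) with h1 | h2
  · rw [PySem.List.pyRange_neg_one_eq_nil (by omega)]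
    have hz : (n - 1).toNat = 0 := by omega
    rw [hz]
    simp [altGo]
  · have hlen : n ≤ (creatures.length : Int) := by
      rcases hpre with h | h
      · omega
      · exact h
    have hi : n - 1 = (((n - 1).toNat : Nat) : Int) := by omega
    rw [hi]
    have := main_lemma (n - 1).toNat creatures (n - 1).toNat le_rfl (by left; omega)
    simpa [countA] using this
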